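-- pv_equiv track=rewrite | github.com/phoebbbbe/BRBMDL | fuzzylogic.py | get_fuzzy_values_from_treerules
-- ===== SOURCE A (Python) =====
-- def get_fuzzy_values_from_treerules(tree_rules):
--         lines = tree_rules.split('\n')
--         rules = []
--         stack = []
--         values = {}
--
--         for line in lines:
--             depth = line.count('|')
--             content = line.split('|')[-1].replace('---', '').strip()
--
--             if 'class:' in content:
--                 decision = content.split(':')[-1].strip()
--                 rule = ' and '.join(stack) + f' then {decision}'
--                 rules.append(rule)
--             elif 'truncated branch' in content:
--                 continue
--             elif content == '':
--                 continue
--             else: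
--                 operators = content.split(' ')
--                 feature = operators[0]
--                 value = operators[-1]
--                 if f'{feature}' not in values:
--                     values[f'{feature}'] = set()
--                     values[f'{feature}'].add(value)
--                 else:
--                     values[f'{feature}'].add(value)
--                 if len(stack) >= depth:
--                     stack = stack[:depth-1]
--                 stack.append(content)
--         return values
-- ===== SOURCE B (Python) =====
-- def get_fuzzy_values_from_treerules(tree_rules):
--     # Staged comprehension pipeline instead of a stateful line loop: the original's
--     # stack/rules/depth bookkeeping never affects the returned dict, so it is gone,
--     # and values are gathered per feature (one scan per distinct feature) instead of
--     # being accumulated into a mutated dict line by line.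
--     contents = [line.split('|')[-1].replace('---', '').strip()
--                 for line in tree_rules.split('\n')]
--     kept = [c for c in contents
--             if c and 'class:' not in c and 'truncated branch' not in c]
--     pairs = [(c.split(' ')[0], c.split(' ')[-1]) for c in kept]
--     features = dict.fromkeys(f for f, _ in pairs)
--     return {f: {v for g, v in pairs if g == f} for f in features}
-- ===== Notes on version B (the rewrite author's own statement) =====
-- stated objective: alternative
-- what changed: B replaces A's single stateful loop (with its dead stack/rules/depth bookkeeping and in-place dict mutation) by a staged comprehension pipeline: parse contents, filter, build (feature,value) pairs, dedupe features with dict.fromkeys, then gather each feature's value set by a per-feature scan of the pairs.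
import Mathlib
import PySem

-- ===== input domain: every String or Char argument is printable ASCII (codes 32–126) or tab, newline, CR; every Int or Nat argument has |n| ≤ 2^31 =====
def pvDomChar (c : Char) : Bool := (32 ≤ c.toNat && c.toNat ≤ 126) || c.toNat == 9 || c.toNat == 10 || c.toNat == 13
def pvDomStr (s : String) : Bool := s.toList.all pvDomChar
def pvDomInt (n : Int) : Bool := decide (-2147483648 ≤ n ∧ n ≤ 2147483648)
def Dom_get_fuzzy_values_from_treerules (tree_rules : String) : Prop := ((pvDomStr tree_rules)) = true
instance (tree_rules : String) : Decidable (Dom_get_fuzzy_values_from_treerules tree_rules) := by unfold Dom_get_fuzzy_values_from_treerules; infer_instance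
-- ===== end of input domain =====

-- B replaces A's stateful loop (with dead stack/rules/depth bookkeeping) by a staged
-- comprehension pipeline with a per-feature gathering pass (objective: alternative).

-- ===== PORT A =====
-- s.split(sep) for a nonempty literal sep: split? is some there, so getD [] is exact
def pvSplit (s sep : String) : List String := (PySem.Str.split? s sep).getD []

-- content = line.split('|')[-1].replace('---','').strip()  (split always yields a
-- nonempty list, so [-1] is total; pyGetD with default "" is exact here)
def pvContentA (line : String) : String :=
  PySem.Str.strip (PySem.Str.replace (PySem.List.pyGetD (pvSplit line "|") (-1) "") "---" "")

-- one iteration of A's loop over (rules, stack, values)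
def pvStepA (st : List String × List String × PySem.Dict String (List String)) (line : String) :
    List String × List String × PySem.Dict String (List String) :=
  let rules := st.1
  let stack := st.2.1
  let values := st.2.2
  let depth : Nat := PySem.Str.count line "|"
  let content := pvContentA line
  if PySem.Str.isIn "class:" content then
    let decision := PySem.Str.strip (PySem.List.pyGetD (pvSplit content ":") (-1) "")
    let rule := PySem.Str.join " and " stack ++ " then " ++ decision
    (rules ++ [rule], stack, values)
  else if PySem.Str.isIn "truncated branch" content then
    (rules, stack, values)
  else if content = "" then
    (rules, stack, values)
  else
    let operators := pvSplit content " "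
    let feature := PySem.List.pyGetD operators 0 ""
    let value := PySem.List.pyGetD operators (-1) ""
    let values :=
      if values.contains feature = false then
        (values.insert feature PySem.Set.empty).modify feature PySem.Set.empty
          (fun s => PySem.Set.add s value)
      else
        values.modify feature PySem.Set.empty (fun s => PySem.Set.add s value)
    let stack := if stack.length ≥ depth then PySem.List.slice stack none (some ((depth : Int) - 1)) else stack
    (rules, stack ++ [content], values)

def get_fuzzy_values_from_treerules (tree_rules : String) : List (String × List String) :=
  (((pvSplit tree_rules "\n").foldl pvStepA ([], [], PySem.Dict.empty)).2.2).items

-- ===== PORT B =====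
-- 'c and 'class:' not in c and 'truncated branch' not in c'
def pvKeep (c : String) : Bool :=
  (!(c == "")) && (!(PySem.Str.isIn "class:" c)) && (!(PySem.Str.isIn "truncated branch" c))

-- (c.split(' ')[0], c.split(' ')[-1]); total: split of a string yields a nonempty list
def pvPair (c : String) : String × String :=
  (PySem.List.pyGetD (pvSplit c " ") 0 "", PySem.List.pyGetD (pvSplit c " ") (-1) "")

-- staged pipeline: contents, kept, pairs, deduped features, per-feature value sets
-- ({v for g,v in pairs if g == f} is a set: PySem.Set.ofList of the scanned values)
def get_fuzzy_values_from_treerules_alt (tree_rules : String) : List (String × List String) :=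
  let contents := (pvSplit tree_rules "\n").map pvContentA
  let kept := contents.filter pvKeep
  let pairs := kept.map pvPair
  let features := PySem.List.dedup (pairs.map (fun p => p.1))
  features.map (fun f =>
    (f, PySem.Set.ofList ((pairs.filter (fun p => p.1 == f)).map (fun p => p.2))))

-- ===== PRECONDITION & SPEC =====
def Spec_get_fuzzy_values_from_treerules (tree_rules : String) (out : List (String × List String)) : Prop := out = get_fuzzy_values_from_treerules_alt tree_rules
instance (tree_rules : String) (out : List (String × List String)) : Decidable (Spec_get_fuzzy_values_from_treerules tree_rules out) := by unfold Spec_get_fuzzy_values_from_treerules; infer_instance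

-- ===== CLAIM (what is proved, stated in full; the proofs are below) =====
def Claim_equal_get_fuzzy_values_from_treerules : Prop := ∀ (tree_rules : String), Dom_get_fuzzy_values_from_treerules tree_rules → Spec_get_fuzzy_values_from_treerules tree_rules (get_fuzzy_values_from_treerules tree_rules)

-- ===== LEMMAS AND PROOFS =====

-- A's per-line effect on the values dict alone
def pvStepV (d : PySem.Dict String (List String)) (line : String) :
    PySem.Dict String (List String) :=
  if PySem.Str.isIn "class:" (pvContentA line) then d
  else if PySem.Str.isIn "truncated branch" (pvContentA line) then d
  else if pvContentA line = "" then d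
  else if d.contains (PySem.List.pyGetD (pvSplit (pvContentA line) " ") 0 "") = false then
    (d.insert (PySem.List.pyGetD (pvSplit (pvContentA line) " ") 0 "") PySem.Set.empty).modify
      (PySem.List.pyGetD (pvSplit (pvContentA line) " ") 0 "") PySem.Set.empty
      (fun s => PySem.Set.add s (PySem.List.pyGetD (pvSplit (pvContentA line) " ") (-1) ""))
  else
    d.modify (PySem.List.pyGetD (pvSplit (pvContentA line) " ") 0 "") PySem.Set.empty
      (fun s => PySem.Set.add s (PySem.List.pyGetD (pvSplit (pvContentA line) " ") (-1) ""))

-- the kept line's effect, written as one step over its (feature, value) pair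
def pvGroupStep (d : PySem.Dict String (List String)) (p : String × String) :
    PySem.Dict String (List String) :=
  (d.setdefault p.1 PySem.Set.empty).modify p.1 PySem.Set.empty
    (fun s => PySem.Set.add s p.2)

-- the (feature, value) pairs of the kept lines, as B stages them
def pvPairs (lines : List String) : List (String × String) :=
  ((lines.map pvContentA).filter pvKeep).map pvPair

theorem pvStepA_values (st : List String × List String × PySem.Dict String (List String))
    (line : String) : (pvStepA st line).2.2 = pvStepV st.2.2 line := by
  simp only [pvStepA, pvStepV]
  split_ifs <;> rfl

theorem pvFoldA_values (lines : List String)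
    (r s : List String) (d : PySem.Dict String (List String)) :
    (lines.foldl pvStepA (r, s, d)).2.2 = lines.foldl pvStepV d := by
  induction lines generalizing r s d with
  | nil => rfl
  | cons l ls ih =>
    simp only [List.foldl_cons]
    rcases h : pvStepA (r, s, d) l with ⟨r', s', d'⟩
    have hv : d' = pvStepV d l := by
      have h2 := pvStepA_values (r, s, d) l
      rw [h] at h2
      exact h2
    rw [ih r' s' d', hv]

theorem pvKeep_not_class {c : String} (hc : PySem.Str.isIn "class:" c = true) :
    ¬ (pvKeep c = true) := by
  unfold pvKeep
  rw [hc]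
  simp

theorem pvKeep_not_trunc {c : String} (ht : PySem.Str.isIn "truncated branch" c = true) :
    ¬ (pvKeep c = true) := by
  unfold pvKeep
  rw [ht]
  simp

theorem pvKeep_not_empty : ¬ (pvKeep "" = true) := by decide

theorem pvKeep_yes {c : String} (hc : PySem.Str.isIn "class:" c = false)
    (ht : PySem.Str.isIn "truncated branch" c = false) (he : c ≠ "") : pvKeep c = true := by
  unfold pvKeep
  rw [hc, ht]
  simp [he]

theorem pvStepV_eq (d : PySem.Dict String (List String)) (line : String) :
    pvStepV d line =
      (if pvKeep (pvContentA line) then pvGroupStep d (pvPair (pvContentA line)) else d) := by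
  unfold pvStepV pvGroupStep
  generalize pvContentA line = c
  simp only [pvPair]
  by_cases hc : PySem.Str.isIn "class:" c = true
  · rw [if_pos hc, if_neg (pvKeep_not_class hc)]
  · rw [Bool.not_eq_true] at hc
    rw [if_neg (by rw [hc]; exact Bool.false_ne_true)]
    by_cases ht : PySem.Str.isIn "truncated branch" c = true
    · rw [if_pos ht, if_neg (pvKeep_not_trunc ht)]
    · rw [Bool.not_eq_true] at ht
      rw [if_neg (by rw [ht]; exact Bool.false_ne_true)]
      by_cases he : c = ""
      · rw [if_pos he, he, if_neg pvKeep_not_empty]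
      · rw [if_neg he, if_pos (pvKeep_yes hc ht he)]
        by_cases hf : d.contains (PySem.List.pyGetD (pvSplit c " ") 0 "") = false
        · rw [if_pos hf, PySem.Dict.setdefault_of_not_contains (h := hf)]
        · rw [if_neg hf,
            PySem.Dict.setdefault_of_contains (h := (Bool.not_eq_false _).mp hf)]

theorem pvFoldV_pairs (lines : List String) (d : PySem.Dict String (List String)) :
    lines.foldl pvStepV d = (pvPairs lines).foldl pvGroupStep d := by
  induction lines generalizing d with
  | nil => rfl
  | cons l ls ih =>
    simp only [List.foldl_cons, pvPairs, List.map_cons, List.filter_cons]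
    rw [pvStepV_eq]
    by_cases hk : pvKeep (pvContentA l) = true
    · simp only [hk, if_pos, List.map_cons, List.foldl_cons]
      exact ih (pvGroupStep d (pvPair (pvContentA l)))
    · simp only [Bool.not_eq_true] at hk
      simp only [hk, Bool.false_eq_true, if_false]
      exact ih d

theorem pvGetD_fold (pairs : List (String × String)) (d : PySem.Dict String (List String))
    (f : String) :
    (pairs.foldl pvGroupStep d).getD f PySem.Set.empty =
      ((pairs.filter (fun p => p.1 == f)).map (fun p => p.2)).foldl PySem.Set.add
        (d.getD f PySem.Set.empty) := by
  induction pairs generalizing d with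
  | nil => rfl
  | cons p ps ih =>
    simp only [List.foldl_cons, List.filter_cons]
    by_cases hp : p.1 = f
    · simp only [hp, beq_self_eq_true, if_pos, List.map_cons, List.foldl_cons]
      rw [ih]
      congr 1
      unfold pvGroupStep
      rw [hp, PySem.Dict.getD_modify_self, PySem.Dict.getD_setdefault_self]
    · have hb : (p.1 == f) = false := beq_eq_false_iff_ne.mpr hp
      simp only [hb, Bool.false_eq_true, if_false]
      rw [ih]
      congr 1
      unfold pvGroupStep
      rw [PySem.Dict.getD_modify, if_neg (fun h => hp h.symm),
        PySem.Dict.getD_eq_get?_getD, PySem.Dict.get?_setdefault_of_ne _ _ (fun h => hp h.symm),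
        ← PySem.Dict.getD_eq_get?_getD]

theorem pvKeys_step (d : PySem.Dict String (List String)) (p : String × String) :
    (pvGroupStep d p).keys = PySem.Set.add d.keys p.1 := by
  unfold pvGroupStep
  rw [PySem.Dict.keys_modify,
    PySem.Dict.keys_insert_of_contains (h := by simp [PySem.Dict.contains_setdefault]),
    PySem.Dict.keys_setdefault, PySem.Set.add_eq_ite]
  by_cases hc : d.contains p.1 = true
  · rw [if_pos hc, if_pos ((PySem.Dict.contains_iff_mem_keys _ _).mp hc)]
  · rw [if_neg hc, if_neg (fun hm => hc ((PySem.Dict.contains_iff_mem_keys _ _).mpr hm))]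

theorem pvKeys_fold (pairs : List (String × String)) (d : PySem.Dict String (List String)) :
    (pairs.foldl pvGroupStep d).keys =
      (pairs.map (fun p => p.1)).foldl PySem.Set.add d.keys := by
  induction pairs generalizing d with
  | nil => rfl
  | cons p ps ih =>
    simp only [List.foldl_cons, List.map_cons]
    rw [ih, pvKeys_step]

-- ===== VERDICT (by name: the statement is the Claim_ definition above) =====
theorem get_fuzzy_values_from_treerules_spec : Claim_equal_get_fuzzy_values_from_treerules := by
  intro t _
  unfold Spec_get_fuzzy_values_from_treerules
  unfold get_fuzzy_values_from_treerules get_fuzzy_values_from_treerules_alt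
  rw [pvFoldA_values, pvFoldV_pairs]
  have hkeys : ((pvPairs (pvSplit t "\n")).foldl pvGroupStep PySem.Dict.empty).keys =
      PySem.Set.ofList ((pvPairs (pvSplit t "\n")).map (fun p => p.1)) := by
    rw [pvKeys_fold, PySem.Set.ofList_eq_foldl]
    rfl
  rw [PySem.Dict.items_eq_map_keys _ (by rw [hkeys]; exact PySem.Set.nodup_ofList _)
    PySem.Set.empty, hkeys]
  show _ = (PySem.List.dedup ((pvPairs (pvSplit t "\n")).map (fun p => p.1))).map _
  unfold PySem.List.dedup
  refine List.map_congr_left (fun f _ => ?_)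
  rw [pvGetD_fold, PySem.Set.ofList_eq_foldl]
  rfl
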